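-- pv_equiv track=rewrite | github.com/BackupTheBerlios/htmlhelp-svn | pyhtmlhelp/HTTPServer.py | rsplit
-- ===== SOURCE A (Python) =====
-- def rsplit(path):
-- 	"""Split a pathname.  Returns tuple "(head, tail)" where "tail" is
-- 	everything after the first slash.  Either part may be empty."""
--
-- 	head, tail = '', path
-- 	while tail and not head:
-- 		i = tail.find('/')
-- 		if i >= 0:
-- 			head, tail = tail[:i], tail[i+1:]
-- 		else:
-- 			head, tail = tail, ''
-- 	return head, tail
-- ===== SOURCE B (Python) =====
-- def rsplit(path):
-- 	"""Split a pathname.  Returns tuple "(head, tail)" where "tail" is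
-- 	everything after the first slash.  Either part may be empty."""
-- 	s = path.lstrip('/')
-- 	i = s.find('/')
-- 	if i < 0:
-- 		return s, ''
-- 	return s[:i], s[i+1:]
-- ===== Notes on version B (the rewrite author's own statement) =====
-- stated objective: idiomatic
-- what changed: A's while-loop that re-slices the string to skip leading slashes is replaced by a loop-free strip-then-split: lstrip('/') once, then a single find and two slices.
import Mathlib
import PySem

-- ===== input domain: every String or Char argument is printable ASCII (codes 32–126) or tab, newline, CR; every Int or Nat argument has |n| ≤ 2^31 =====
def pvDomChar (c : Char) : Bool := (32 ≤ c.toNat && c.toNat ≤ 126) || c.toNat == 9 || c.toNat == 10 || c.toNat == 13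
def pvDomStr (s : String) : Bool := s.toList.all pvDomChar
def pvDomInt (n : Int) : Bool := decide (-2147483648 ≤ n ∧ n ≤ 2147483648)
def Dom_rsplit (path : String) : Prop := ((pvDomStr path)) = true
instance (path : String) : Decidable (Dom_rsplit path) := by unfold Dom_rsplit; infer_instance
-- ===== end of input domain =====

-- B replaces A's re-slicing while-loop with a loop-free lstrip-then-find split (idiomatic; same cost).

-- B replaces A's re-slicing while-loop with a loop-free lstrip-then-find split (idiomatic; same cost).

-- ===== PORT A =====
-- while tail and not head: i = tail.find('/'); if i >= 0: head, tail = tail[:i], tail[i+1:] else: head, tail = tail, ''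
def rsplitLoop (head tail : List Char) : List Char × List Char :=
  if _h : tail ≠ [] ∧ head = [] then
    let i := PySem.Chars.find tail ['/']
    if 0 ≤ i then
      rsplitLoop (PySem.List.slice tail none (some i)) (PySem.List.slice tail (some (i + 1)) none)
    else
      rsplitLoop tail []
  else (head, tail)
termination_by tail.length
decreasing_by
  · rw [PySem.List.slice_from tail (by omega : (0:Int) ≤ i + 1)]
    have : tail.length ≠ 0 := by
      intro h; exact _h.1 (List.eq_nil_of_length_eq_zero h)
    simp [List.length_drop]; omega
  · have : tail.length ≠ 0 := by
      intro h; exact _h.1 (List.eq_nil_of_length_eq_zero h)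
    simp; omega

def rsplit (path : String) : String × String :=
  let r := rsplitLoop [] path.toList
  (String.ofList r.1, String.ofList r.2)

-- ===== PORT B =====
-- s = path.lstrip('/'); i = s.find('/'); if i < 0: return s, ''; return s[:i], s[i+1:]
-- (lstrip('/') ported by hand as dropWhile (· == '/'): exact — it drops exactly the leading '/' characters)
def rsplit_alt (path : String) : String × String :=
  let s := path.toList.dropWhile (· == '/')
  let i := PySem.Chars.find s ['/']
  if i < 0 then (String.ofList s, "")
  else (String.ofList (PySem.List.slice s none (some i)),
        String.ofList (PySem.List.slice s (some (i + 1)) none))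

-- ===== PRECONDITION & SPEC =====
def Spec_rsplit (path : String) (out : String × String) : Prop := out = rsplit_alt path
instance (path : String) (out : String × String) : Decidable (Spec_rsplit path out) := by unfold Spec_rsplit; infer_instance

-- ===== CLAIM (what is proved, stated in full; the proofs are below) =====
def Claim_equal_rsplit : Prop := ∀ (path : String), Dom_rsplit path → Spec_rsplit path (rsplit path)

-- ===== LEMMAS AND PROOFS =====

-- find.go ['/'] returns -1 or a value ≥ its accumulator
theorem findGo_slash_lb (t : List Char) (k : Nat) :
    PySem.Chars.find.go ['/'] t k = -1 ∨ (k : Int) ≤ PySem.Chars.find.go ['/'] t k := by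
  induction t generalizing k with
  | nil => simp [PySem.Chars.find.go]
  | cons c t ih =>
    simp only [PySem.Chars.find.go]
    split
    · right; exact le_refl _
    · rcases ih (k + 1) with h | h
      · left; exact h
      · right; omega

-- find on a cons whose head is not '/' shifts into find.go with accumulator 1
theorem find_cons_ne (c : Char) (t : List Char) (hc : c ≠ '/') :
    PySem.Chars.find (c :: t) ['/'] = PySem.Chars.find.go ['/'] t 1 := by
  simp [PySem.Chars.find, PySem.Chars.find.go, List.isPrefixOf]
  exact fun h => absurd h.symm hc

-- A's loop skips a leading slash
theorem loop_skip (rest : List Char) :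
    rsplitLoop [] ('/' :: rest) = rsplitLoop [] rest := by
  rw [rsplitLoop]
  have hfind : PySem.Chars.find ('/' :: rest) ['/'] = 0 := by
    simp [PySem.Chars.find, PySem.Chars.find.go, List.isPrefixOf]
  simp only [hfind]
  norm_num
  rw [if_neg (by simp : ¬('/' :: rest = []))]
  rw [PySem.List.slice_to _ (by norm_num : (0:Int) ≤ 0),
      PySem.List.slice_from _ (by norm_num : (0:Int) ≤ 1)]
  norm_num

-- A's loop on a list not starting with '/' is B's find-and-slice split
theorem loop_noslash (s : List Char) (hs : ∀ c, s.head? = some c → c ≠ '/') :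
    rsplitLoop [] s =
      (if PySem.Chars.find s ['/'] < 0 then (s, ([] : List Char))
       else (PySem.List.slice s none (some (PySem.Chars.find s ['/'])),
             PySem.List.slice s (some (PySem.Chars.find s ['/'] + 1)) none)) := by
  cases s with
  | nil =>
    rw [rsplitLoop]
    simp [PySem.Chars.find, PySem.Chars.find.go]
  | cons c t =>
    have hc : c ≠ '/' := hs c rfl
    have hfe := find_cons_ne c t hc
    rw [rsplitLoop, dif_pos ⟨by simp, rfl⟩]
    rcases findGo_slash_lb t 1 with hgo | hgo
    · -- no slash anywhere: A sets head := tail, tail := '' and stops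
      have hneg : PySem.Chars.find (c :: t) ['/'] = -1 := by rw [hfe, hgo]
      simp only [hneg]
      rw [if_neg (by norm_num), if_pos (by norm_num)]
      rw [rsplitLoop, dif_neg (by simp)]
    · -- slash at index i ≥ 1: head := tail[:i] is nonempty, so the loop stops
      have hi : (1:Int) ≤ PySem.Chars.find (c :: t) ['/'] := by rw [hfe]; exact hgo
      rw [if_pos (by omega), if_neg (by omega)]
      have hhead : PySem.List.slice (c :: t) none (some (PySem.Chars.find (c :: t) ['/'])) ≠ [] := by
        rw [PySem.List.slice_to _ (by omega : (0:Int) ≤ PySem.Chars.find (c :: t) ['/'])]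
        have hnz : (PySem.Chars.find (c :: t) ['/']).toNat ≠ 0 := by omega
        cases h : (PySem.Chars.find (c :: t) ['/']).toNat with
        | zero => exact absurd h hnz
        | succ n => simp
      rw [rsplitLoop, dif_neg (by simp [hhead])]

-- the list-level equivalence
theorem loop_eq_alt (xs : List Char) :
    rsplitLoop [] xs =
      (let s := xs.dropWhile (· == '/')
       if PySem.Chars.find s ['/'] < 0 then (s, ([] : List Char))
       else (PySem.List.slice s none (some (PySem.Chars.find s ['/'])),
             PySem.List.slice s (some (PySem.Chars.find s ['/'] + 1)) none)) := by
  induction xs with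
  | nil => exact loop_noslash [] (by simp)
  | cons c t ih =>
    by_cases hc : c = '/'
    · subst hc
      rw [loop_skip, ih]
      simp
    · have hd : (c :: t).dropWhile (· == '/') = c :: t := by
        simp [hc]
      rw [hd]
      exact loop_noslash (c :: t) (fun x hx => by simp at hx; subst hx; exact hc)

-- ===== VERDICT (by name: the statement is the Claim_ definition above) =====
theorem rsplit_spec : Claim_equal_rsplit := by
  intro path _
  unfold Spec_rsplit rsplit rsplit_alt
  rw [loop_eq_alt]
  simp only []
  split
  · rfl
  · rfl
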